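-- pv_equiv track=rewrite | github.com/gabrielolivrp/automata | lib/dfa_min.py | _transitivity_states
-- ===== SOURCE A (Python) =====
-- from itertools import combinations
--
-- def _transitivity_states(states):
--     stable = False
--     while not stable:                        # loop until no further reduction is found
--         stable = True
--         for s, t in combinations(states, 2):
--             if s & t:                        # do the states intersect ?
--                 s |= t                       # move items from t to s
--                 t ^= t                       # empty t
--                 stable = False
--         states = list(filter(None, states))  # added list() for python 3
--     return states
-- ===== SOURCE B (Python) =====
-- def _transitivity_states(states):
--     # Repeatedly distribute the sets over a fresh group list: each non-empty set
--     # joins the first group it intersects (growing that group), otherwise it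
--     # starts a new group.  Stop as soon as a sweep performs no merge.
--     # (Unlike A, the caller's sets are not mutated; the return value is the same.)
--     cur = states
--     while True:
--         groups = []
--         changed = False
--         for t in cur:
--             if not t:
--                 continue
--             for k, g in enumerate(groups):
--                 if g & t:
--                     groups[k] = g | t
--                     changed = True
--                     break
--             else:
--                 groups.append(t)
--         cur = groups
--         if not changed:
--             return cur
-- ===== Notes on version B (the rewrite author's own statement) =====
-- stated objective: alternative
-- what changed: A repeatedly scans all O(n^2) index pairs (including slots it has already emptied) with in-place emptying and a filter pass; B instead rebuilds a list of groups each sweep, inserting every non-empty set into the first group it intersects, repeating until a sweep performs no merge; it trades the pairwise-combinations scan for incremental group insertion without mutating the caller's sets.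
import Mathlib
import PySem

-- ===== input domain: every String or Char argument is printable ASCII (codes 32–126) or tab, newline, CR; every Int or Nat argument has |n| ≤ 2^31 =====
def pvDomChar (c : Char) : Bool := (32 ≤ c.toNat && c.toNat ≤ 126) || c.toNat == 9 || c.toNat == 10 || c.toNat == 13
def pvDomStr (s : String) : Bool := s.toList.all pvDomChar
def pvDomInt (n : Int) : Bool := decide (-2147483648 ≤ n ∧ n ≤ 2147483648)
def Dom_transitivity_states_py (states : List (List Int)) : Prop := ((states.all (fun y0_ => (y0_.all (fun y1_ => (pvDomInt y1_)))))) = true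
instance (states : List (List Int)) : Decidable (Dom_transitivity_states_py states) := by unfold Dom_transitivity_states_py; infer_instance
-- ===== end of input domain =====

-- B replaces A's repeated pairwise-combinations passes (with in-place emptying and
-- filtering) by sweeps that insert each set into the first group it intersects;
-- same return value (A additionally mutates the caller's sets in place, B does not).

-- ===== PORT A =====
-- the row of combinations pairs (i, j) for fixed i: s absorbs each later t it
-- intersects (s |= t; t ^= t leaves an empty placeholder in place); the Bool
-- records whether any merge happened (stable = False)
def pvRowA (s : List Int) (rest : List (List Int)) : List Int × List (List Int) × Bool :=
  match rest with
  | [] => (s, [], false)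
  | t :: ts =>
    if PySem.Set.inter s t ≠ [] then
      let r := pvRowA (PySem.Set.union s t) ts
      (r.1, [] :: r.2.1, true)
    else
      let r := pvRowA s ts
      (r.1, t :: r.2.1, r.2.2)

theorem pvRowA_len (s : List Int) (rest : List (List Int)) :
    (pvRowA s rest).2.1.length = rest.length := by
  induction rest generalizing s with
  | nil => simp [pvRowA]
  | cons t ts ih =>
    simp only [pvRowA]
    split <;> simp [ih]

-- one full 'for s, t in combinations(states, 2)' loop
def pvPassA (states : List (List Int)) : List (List Int) × Bool :=
  match states with
  | [] => ([], false)
  | s :: rest =>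
    let r := pvRowA s rest
    let p := pvPassA r.2.1
    (r.1 :: p.1, r.2.2 || p.2)
termination_by states.length
decreasing_by simp [pvRowA_len]

-- the 'while not stable' loop; fuel is only a totality guard
def pvLoopA (fuel : Nat) (states : List (List Int)) : List (List Int) :=
  match fuel with
  | 0 => states
  | n + 1 =>
    let p := pvPassA states
    let states' := p.1.filter (fun s => s ≠ [])   -- list(filter(None, states))
    if p.2 then pvLoopA n states' else states'

def transitivity_states_py (states : List (List Int)) : List (List Int) :=
  pvLoopA (states.length + 2) states

-- ===== PORT B =====
-- insert t into the first group it intersects (the for…break/else over groups);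
-- Bool = a merge happened
def pvInsertB (groups : List (List Int)) (t : List Int) : List (List Int) × Bool :=
  match groups with
  | [] => ([t], false)
  | g :: gs =>
    if PySem.Set.inter g t ≠ [] then (PySem.Set.union g t :: gs, true)
    else
      let r := pvInsertB gs t
      (g :: r.1, r.2)

-- one sweep: 'for t in cur: …'
def pvStepB (acc : List (List Int) × Bool) (t : List Int) : List (List Int) × Bool :=
  if t = [] then acc
  else
    let r := pvInsertB acc.1 t
    (r.1, acc.2 || r.2)

def pvPassB (states : List (List Int)) : List (List Int) × Bool :=
  states.foldl pvStepB ([], false)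

-- the 'while True' loop; fuel is only a totality guard
def pvLoopB (fuel : Nat) (cur : List (List Int)) : List (List Int) :=
  match fuel with
  | 0 => cur
  | n + 1 =>
    let p := pvPassB cur
    if p.2 then pvLoopB n p.1 else p.1

def transitivity_states_py_alt (states : List (List Int)) : List (List Int) :=
  pvLoopB (states.length + 2) states

-- ===== PRECONDITION & SPEC =====
def Spec_transitivity_states_py (states : List (List Int)) (out : List (List Int)) : Prop := out = transitivity_states_py_alt states
instance (states : List (List Int)) (out : List (List Int)) : Decidable (Spec_transitivity_states_py states out) := by unfold Spec_transitivity_states_py; infer_instance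

-- ===== CLAIM (what is proved, stated in full; the proofs are below) =====
def Claim_equal_transitivity_states_py : Prop := ∀ (states : List (List Int)), Dom_transitivity_states_py states → Spec_transitivity_states_py states (transitivity_states_py states)

-- ===== LEMMAS AND PROOFS =====

theorem pv_inter_nil_right (s : List Int) : PySem.Set.inter s [] = [] := by
  simp [PySem.Set.inter]

theorem pv_inter_nil_left (t : List Int) : PySem.Set.inter [] t = [] := by
  simp [PySem.Set.inter]

theorem pv_add_ne_nil (s : List Int) (x : Int) (h : s ≠ []) : PySem.Set.add s x ≠ [] := by
  simp only [PySem.Set.add]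
  split
  · exact h
  · simp

theorem pv_union_ne_nil (g t : List Int) (h : g ≠ []) : PySem.Set.union g t ≠ [] := by
  induction t generalizing g with
  | nil => simpa [PySem.Set.union, PySem.Set.update]
  | cons x t ih =>
    simpa [PySem.Set.union, PySem.Set.update] using ih (PySem.Set.add g x) (pv_add_ne_nil g x h)

-- equation lemmas for the helpers, in the shapes the main proofs rewrite with
theorem pvRowA_cons_nil (g : List Int) (ts : List (List Int)) :
    pvRowA g ([] :: ts) = ((pvRowA g ts).1, [] :: (pvRowA g ts).2.1, (pvRowA g ts).2.2) := by
  simp [pvRowA, pv_inter_nil_right]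

theorem pvRowA_cons_hit (g t : List Int) (ts : List (List Int))
    (h : PySem.Set.inter g t ≠ []) :
    pvRowA g (t :: ts) =
      ((pvRowA (PySem.Set.union g t) ts).1, [] :: (pvRowA (PySem.Set.union g t) ts).2.1, true) := by
  simp [pvRowA, h]

theorem pvRowA_cons_miss (g t : List Int) (ts : List (List Int))
    (h : ¬ PySem.Set.inter g t ≠ []) :
    pvRowA g (t :: ts) = ((pvRowA g ts).1, t :: (pvRowA g ts).2.1, (pvRowA g ts).2.2) := by
  simp [pvRowA, h]

theorem pvStepB_nil (acc : List (List Int) × Bool) : pvStepB acc [] = acc := by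
  simp [pvStepB]

theorem pvStepB_cons (gs : List (List Int)) (c : Bool) (t : List Int) (ht : t ≠ []) :
    pvStepB (gs, c) t = ((pvInsertB gs t).1, c || (pvInsertB gs t).2) := by
  simp [pvStepB, ht]

theorem pvInsertB_hit (g t : List Int) (gs : List (List Int))
    (h : PySem.Set.inter g t ≠ []) :
    pvInsertB (g :: gs) t = (PySem.Set.union g t :: gs, true) := by
  simp [pvInsertB, h]

theorem pvInsertB_miss (g t : List Int) (gs : List (List Int))
    (h : ¬ PySem.Set.inter g t ≠ []) :
    pvInsertB (g :: gs) t = (g :: (pvInsertB gs t).1, (pvInsertB gs t).2) := by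
  simp [pvInsertB, h]

theorem pvRowA_nil (ts : List (List Int)) : pvRowA [] ts = ([], ts, false) := by
  induction ts with
  | nil => simp [pvRowA]
  | cons t ts ih => rw [pvRowA_cons_miss [] t ts (by simp [pv_inter_nil_left]), ih]

theorem pvRowA_fst_ne_nil (s : List Int) (ts : List (List Int)) (h : s ≠ []) :
    (pvRowA s ts).1 ≠ [] := by
  induction ts generalizing s with
  | nil => simpa [pvRowA]
  | cons t ts ih =>
    by_cases hit : PySem.Set.inter s t ≠ []
    · rw [pvRowA_cons_hit s t ts hit]
      exact ih _ (pv_union_ne_nil _ _ h)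
    · rw [pvRowA_cons_miss s t ts hit]
      exact ih _ h

-- the changed flag accumulates by Bool-or and does not influence the groups
theorem pv_fold_flag (l : List (List Int)) (gs : List (List Int)) (c : Bool) :
    l.foldl pvStepB (gs, c) =
      ((l.foldl pvStepB (gs, false)).1, c || (l.foldl pvStepB (gs, false)).2) := by
  induction l generalizing gs c with
  | nil => simp
  | cons t l ih =>
    by_cases ht : t = []
    · subst ht
      simp only [List.foldl_cons, pvStepB_nil]
      exact ih gs c
    · simp only [List.foldl_cons, pvStepB_cons _ _ _ ht, Bool.false_or]
      rw [ih _ (c || (pvInsertB gs t).2), ih _ ((pvInsertB gs t).2)]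
      simp [Bool.or_assoc]

-- KEY: a sweep over (g :: gs) = g absorbing (one combinations row), then a sweep
-- of the remainder over gs
theorem pv_fold_cons (ts : List (List Int)) (g : List Int) (gs : List (List Int))
    (c : Bool) (hg : g ≠ []) :
    ts.foldl pvStepB (g :: gs, c) =
      ((pvRowA g ts).1 :: ((pvRowA g ts).2.1.foldl pvStepB (gs, c || (pvRowA g ts).2.2)).1,
       ((pvRowA g ts).2.1.foldl pvStepB (gs, c || (pvRowA g ts).2.2)).2) := by
  induction ts generalizing g gs c with
  | nil => simp [pvRowA]
  | cons t ts ih =>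
    by_cases ht : t = []
    · subst ht
      simp only [List.foldl_cons, pvStepB_nil, pvRowA_cons_nil]
      exact ih g gs c hg
    · by_cases hit : PySem.Set.inter g t ≠ []
      · have h2 := ih (PySem.Set.union g t) gs true (pv_union_ne_nil _ _ hg)
        simp only [Bool.true_or] at h2
        simp only [List.foldl_cons, pvStepB_cons _ _ _ ht, pvInsertB_hit _ _ _ hit,
          pvRowA_cons_hit _ _ _ hit, pvStepB_nil, Bool.or_true]
        exact h2
      · simp only [List.foldl_cons, pvStepB_cons _ _ _ ht, pvInsertB_miss _ _ _ hit,
          pvRowA_cons_miss _ _ _ hit]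
        rw [ih g _ _ hg]
        have hflag : (c || (pvInsertB gs t).2 || (pvRowA g ts).2.2)
            = (c || (pvRowA g ts).2.2 || (pvInsertB gs t).2) := by
          simp only [Bool.or_comm, Bool.or_left_comm]
        rw [hflag]

-- a B sweep equals an A pass with the empty placeholders filtered out
theorem pv_pass_eq (states : List (List Int)) :
    pvPassB states = ((pvPassA states).1.filter (fun s => s ≠ []), (pvPassA states).2) := by
  induction states using pvPassA.induct with
  | case1 => simp [pvPassB, pvPassA]
  | case2 s rest r ih =>
    have hr : r = pvRowA s rest := rfl
    rw [hr] at ih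
    by_cases hs : s = []
    · subst hs
      rw [pvRowA_nil rest] at ih
      show List.foldl pvStepB (pvStepB ([], false) []) rest = _
      rw [pvStepB_nil]
      have hp : pvPassA ([] :: rest) = ([] :: (pvPassA rest).1, false || (pvPassA rest).2) := by
        simp [pvPassA, pvRowA_nil]
      rw [hp]
      simpa [pvPassB] using ih
    · have hne := pvRowA_fst_ne_nil s rest hs
      show List.foldl pvStepB (pvStepB ([], false) s) rest = _
      rw [pvStepB_cons _ _ _ hs]
      simp only [pvInsertB, Bool.or_false]
      rw [pv_fold_cons rest s [] false hs,
          pv_fold_flag _ ([] : List (List Int)) (false || (pvRowA s rest).2.2)]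
      have hp : pvPassA (s :: rest) =
          ((pvRowA s rest).1 :: (pvPassA (pvRowA s rest).2.1).1,
           (pvRowA s rest).2.2 || (pvPassA (pvRowA s rest).2.1).2) := by
        simp [pvPassA]
      rw [hp,
          show List.foldl pvStepB ([], false) (pvRowA s rest).2.1
            = pvPassB (pvRowA s rest).2.1 from rfl, ih]
      simp [hne]

theorem pv_loop_eq (n : Nat) (states : List (List Int)) :
    pvLoopA n states = pvLoopB n states := by
  induction n generalizing states with
  | zero => rfl
  | succ n ih =>
    simp only [pvLoopA, pvLoopB, pv_pass_eq]
    split <;> simp [ih]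

-- ===== VERDICT (by name: the statement is the Claim_ definition above) =====
theorem transitivity_states_py_spec : Claim_equal_transitivity_states_py := by
  intro states _
  unfold Spec_transitivity_states_py transitivity_states_py transitivity_states_py_alt
  exact pv_loop_eq _ _
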